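-- pv_equiv track=rewrite | github.com/yu-hao123/async-classifier | asynchronyClassifier/classify.py | find_auto_trigger
-- ===== SOURCE A (Python) =====
-- def find_auto_trigger(ins_marks, exp_marks, pmus_start_marks, pmus_finish_marks):
--     indexes = []
--     for i in range(len(pmus_finish_marks)):
--         if (i + 1 >= len(pmus_start_marks)):
--             break
--         next_ins = pmus_start_marks[i + 1]
--         for j in range(len(ins_marks)):
--             if (ins_marks[j] > pmus_finish_marks[i] and ins_marks[j] < next_ins):
--                 if (j >= len(exp_marks)):
--                     break
--                 if (exp_marks[j] > pmus_finish_marks[i] and exp_marks[j] < next_ins):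
--                     indexes.append(ins_marks[j])
--     return indexes
-- ===== SOURCE B (Python) =====
-- def find_auto_trigger(ins_marks, exp_marks, pmus_start_marks, pmus_finish_marks):
--     # Inverted loop nest: a single pass over the (ins, exp) pairs distributes
--     # each ins value into per-interval buckets; flattening the buckets restores
--     # A's interval-major output order.  (Pairs beyond len(exp_marks) can never
--     # be appended by A, so zip truncation is exact.)
--     intervals = list(zip(pmus_finish_marks, pmus_start_marks[1:]))
--     buckets = [[] for _ in intervals]
--     for v, e in zip(ins_marks, exp_marks):
--         for b, (fin, nxt) in zip(buckets, intervals):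
--             if fin < v < nxt and fin < e < nxt:
--                 b.append(v)
--     out = []
--     for b in buckets:
--         out += b
--     return out
-- ===== Notes on version B (the rewrite author's own statement) =====
-- stated objective: alternative
-- what changed: Inverts A's loop nest: instead of scanning all ins_marks once per interval, B makes one pass over the (ins, exp) pairs, distributing each value into per-interval buckets, and flattens the buckets at the end to recover interval-major order.
import Mathlib
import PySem

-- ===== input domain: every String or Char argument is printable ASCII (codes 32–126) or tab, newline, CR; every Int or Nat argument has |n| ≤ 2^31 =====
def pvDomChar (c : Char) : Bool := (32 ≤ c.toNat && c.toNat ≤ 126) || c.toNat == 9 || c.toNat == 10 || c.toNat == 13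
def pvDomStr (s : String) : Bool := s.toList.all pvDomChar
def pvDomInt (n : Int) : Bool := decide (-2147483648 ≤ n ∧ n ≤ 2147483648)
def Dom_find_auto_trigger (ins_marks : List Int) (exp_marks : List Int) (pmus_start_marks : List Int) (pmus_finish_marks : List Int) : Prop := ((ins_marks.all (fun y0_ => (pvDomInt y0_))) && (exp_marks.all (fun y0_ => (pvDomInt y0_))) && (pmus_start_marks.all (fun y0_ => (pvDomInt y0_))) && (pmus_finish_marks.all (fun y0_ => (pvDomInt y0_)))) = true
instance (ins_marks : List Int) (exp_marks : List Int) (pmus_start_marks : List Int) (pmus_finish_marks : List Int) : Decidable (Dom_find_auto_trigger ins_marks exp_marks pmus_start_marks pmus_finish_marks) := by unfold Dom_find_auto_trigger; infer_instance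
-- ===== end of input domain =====

-- B inverts A's loop nest: one pass over the (ins, exp) pairs filling per-interval buckets,
-- flattened at the end (objective: alternative; same asymptotic cost).
-- ===== PORT A =====
-- inner `for j in range(len(ins_marks))` loop of A, with its two `break`/skip branches
def fatInner (ins exp : List Int) (fin nxt : Int) (j : Nat) (acc : List Int) : List Int :=
  if h : j < ins.length then
    if ins[j] > fin ∧ ins[j] < nxt then
      if exp.length ≤ j then acc
      else if exp.getD j 0 > fin ∧ exp.getD j 0 < nxt then
        fatInner ins exp fin nxt (j+1) (acc ++ [ins[j]])
      else fatInner ins exp fin nxt (j+1) acc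
    else fatInner ins exp fin nxt (j+1) acc
  else acc
termination_by ins.length - j

-- outer `for i in range(len(pmus_finish_marks))` loop of A with its `break`
def fatOuter (ins exp starts fins : List Int) (i : Nat) (acc : List Int) : List Int :=
  if i < fins.length then
    if starts.length ≤ i + 1 then acc
    else fatOuter ins exp starts fins (i+1)
      (fatInner ins exp (fins.getD i 0) (starts.getD (i+1) 0) 0 acc)
  else acc
termination_by fins.length - i

def find_auto_trigger (ins_marks : List Int) (exp_marks : List Int) (pmus_start_marks : List Int) (pmus_finish_marks : List Int) : List Int :=
  fatOuter ins_marks exp_marks pmus_start_marks pmus_finish_marks 0 []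

-- ===== PORT B =====
-- the per-pair bucket update: `buckets = [b + [v] if … else b for b, (fin, nxt) in zip(buckets, intervals)]`
def fatAltStep (intervals : List (Int × Int)) (buckets : List (List Int)) (p : Int × Int) : List (List Int) :=
  (buckets.zip intervals).map (fun bi =>
    if bi.2.1 < p.1 && p.1 < bi.2.2 && bi.2.1 < p.2 && p.2 < bi.2.2 then bi.1 ++ [p.1] else bi.1)

def find_auto_trigger_alt (ins_marks : List Int) (exp_marks : List Int) (pmus_start_marks : List Int) (pmus_finish_marks : List Int) : List Int :=
  let intervals := pmus_finish_marks.zip (pmus_start_marks.drop 1)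
  let buckets := (ins_marks.zip exp_marks).foldl (fatAltStep intervals)
    (intervals.map (fun _ => ([] : List Int)))
  buckets.foldl (· ++ ·) []

-- ===== PRECONDITION & SPEC =====
def Spec_find_auto_trigger (ins_marks : List Int) (exp_marks : List Int) (pmus_start_marks : List Int) (pmus_finish_marks : List Int) (out : List Int) : Prop := out = find_auto_trigger_alt ins_marks exp_marks pmus_start_marks pmus_finish_marks
instance (ins_marks : List Int) (exp_marks : List Int) (pmus_start_marks : List Int) (pmus_finish_marks : List Int) (out : List Int) : Decidable (Spec_find_auto_trigger ins_marks exp_marks pmus_start_marks pmus_finish_marks out) := by unfold Spec_find_auto_trigger; infer_instance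

-- ===== CLAIM (what is proved, stated in full; the proofs are below) =====
def Claim_equal_find_auto_trigger : Prop := ∀ (ins_marks : List Int) (exp_marks : List Int) (pmus_start_marks : List Int) (pmus_finish_marks : List Int), Dom_find_auto_trigger ins_marks exp_marks pmus_start_marks pmus_finish_marks → Spec_find_auto_trigger ins_marks exp_marks pmus_start_marks pmus_finish_marks (find_auto_trigger ins_marks exp_marks pmus_start_marks pmus_finish_marks)

-- ===== LEMMAS AND PROOFS =====
lemma fatInner_eq_aux (ins exp : List Int) (fin nxt : Int) :
    ∀ k j acc, ins.length ≤ j + k → fatInner ins exp fin nxt j acc =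
      acc ++ (((ins.zip exp).drop j).filter
        (fun p => fin < p.1 && p.1 < nxt && fin < p.2 && p.2 < nxt)).map Prod.fst := by
  intro k
  induction k with
  | zero =>
    intro j acc h
    rw [fatInner]
    have hj : ¬ j < ins.length := by omega
    have hz : (ins.zip exp).drop j = [] :=
      List.drop_eq_nil_of_le (by simp [List.length_zip]; omega)
    simp [hj, hz]
  | succ k ih =>
    intro j acc h
    rw [fatInner]
    by_cases hj : j < ins.length
    · simp only [hj, dif_pos]
      by_cases hje : j < exp.length
      · have hjz : j < (ins.zip exp).length := by simp [List.length_zip]; omega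
        have hz : (ins.zip exp).drop j = (ins.zip exp)[j] :: (ins.zip exp).drop (j+1) :=
          List.drop_eq_getElem_cons hjz
        have hget : (ins.zip exp)[j] = (ins[j], exp[j]) := List.getElem_zip
        have hgd : exp.getD j 0 = exp[j] := List.getD_eq_getElem exp 0 hje
        rw [hz, hget, List.filter_cons]
        have hne : ¬ exp.length ≤ j := by omega
        by_cases h1 : ins[j] > fin ∧ ins[j] < nxt
        · by_cases h2 : exp[j] > fin ∧ exp[j] < nxt
          · rw [if_pos h1, if_neg hne, hgd, if_pos h2, ih _ _ (by omega)]
            have : (fin < ins[j] && ins[j] < nxt && (fin < exp[j]) && exp[j] < nxt) = true := by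
              simp [h1.1, h1.2, h2.1, h2.2]
            simp [this]
          · rw [if_pos h1, if_neg hne, hgd, if_neg h2, ih _ _ (by omega)]
            have : (fin < ins[j] && ins[j] < nxt && (fin < exp[j]) && exp[j] < nxt) = false := by
              rcases not_and_or.mp h2 with h | h <;> simp [h]
            simp [this]
        · rw [if_neg h1, ih _ _ (by omega)]
          have : (fin < ins[j] && ins[j] < nxt && (fin < exp[j]) && exp[j] < nxt) = false := by
            rcases not_and_or.mp h1 with h | h <;> simp [h]
          simp [this]
      · -- j ≥ exp.length : zip is exhausted, A's loop can only break or skip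
        have hz : (ins.zip exp).drop j = [] :=
          List.drop_eq_nil_of_le (by simp [List.length_zip]; omega)
        have hz1 : (ins.zip exp).drop (j+1) = [] :=
          List.drop_eq_nil_of_le (by simp [List.length_zip]; omega)
        by_cases h1 : ins[j] > fin ∧ ins[j] < nxt
        · rw [if_pos h1, if_pos (by omega : exp.length ≤ j)]
          simp [hz]
        · rw [if_neg h1, ih _ _ (by omega)]
          simp [hz, hz1]
    · have hz : (ins.zip exp).drop j = [] :=
        List.drop_eq_nil_of_le (by simp [List.length_zip]; omega)
      simp [hj, hz]

lemma fatOuter_eq (ins exp starts fins : List Int) :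
    ∀ i acc, fatOuter ins exp starts fins i acc =
      ((fins.zip (starts.drop 1)).drop i).foldl
        (fun acc fs =>
          acc ++ ((ins.zip exp).filter
            (fun p => fs.1 < p.1 && p.1 < fs.2 && fs.1 < p.2 && p.2 < fs.2)).map Prod.fst)
        acc := by
  intro i
  induction hk : fins.length - i using Nat.strong_induction_on generalizing i with
  | _ k ih =>
  intro acc
  rw [fatOuter]
  by_cases hi : i < fins.length
  · by_cases hs : starts.length ≤ i + 1
    · have hz : (fins.zip (starts.drop 1)).drop i = [] :=
        List.drop_eq_nil_of_le (by simp [List.length_zip]; omega)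
      rw [if_pos hi, if_pos hs, hz]
      rfl
    · have hiz : i < (fins.zip (starts.drop 1)).length := by
        simp [List.length_zip]; omega
      have hz : (fins.zip (starts.drop 1)).drop i
          = (fins.zip (starts.drop 1))[i] :: (fins.zip (starts.drop 1)).drop (i+1) :=
        List.drop_eq_getElem_cons hiz
      have hget : (fins.zip (starts.drop 1))[i]
          = (fins[i], starts[i+1]'(by omega)) := by
        rw [List.getElem_zip]; simp
      have hgd1 : fins.getD i 0 = fins[i] := List.getD_eq_getElem fins 0 hi
      have hgd2 : starts.getD (i+1) 0 = starts[i+1]'(by omega) :=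
        List.getD_eq_getElem starts 0 (by omega : i + 1 < starts.length)
      rw [if_pos hi, if_neg hs, ih (fins.length - (i+1)) (by omega) (i+1) rfl, hz,
        List.foldl_cons, hget, hgd1, hgd2,
        fatInner_eq_aux ins exp _ _ ins.length 0 acc (by omega)]
      simp
  · have hz : (fins.zip (starts.drop 1)).drop i = [] :=
      List.drop_eq_nil_of_le (by simp [List.length_zip]; omega)
    rw [if_neg hi, hz]
    rfl

-- one bucket-update step, on buckets of the shape `intervals.map f`
lemma fatAltStep_map (intervals : List (Int × Int)) (f : Int × Int → List Int) (p : Int × Int) :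
    fatAltStep intervals (intervals.map f) p
      = intervals.map (fun iv =>
          if iv.1 < p.1 && p.1 < iv.2 && iv.1 < p.2 && p.2 < iv.2 then f iv ++ [p.1] else f iv) := by
  unfold fatAltStep
  rw [show intervals.map f = List.map f intervals from rfl,
    show (List.map f intervals).zip intervals = (List.map f intervals).zip (List.map id intervals) by simp,
    List.zip_map', List.map_map]
  rfl

-- invariant of the pass over the pairs: each bucket holds the filtered prefix
lemma fatAlt_foldl_inv (intervals : List (Int × Int)) :
    ∀ (ps : List (Int × Int)) (f : Int × Int → List Int),
      ps.foldl (fatAltStep intervals) (intervals.map f)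
        = intervals.map (fun iv =>
            f iv ++ (ps.filter
              (fun p => iv.1 < p.1 && p.1 < iv.2 && iv.1 < p.2 && p.2 < iv.2)).map Prod.fst) := by
  intro ps
  induction ps with
  | nil => intro f; simp
  | cons p ps ih =>
    intro f
    rw [List.foldl_cons, fatAltStep_map, ih]
    apply List.map_congr_left
    intro iv _
    rw [List.filter_cons]
    by_cases hc : (iv.1 < p.1 && p.1 < iv.2 && iv.1 < p.2 && p.2 < iv.2) = true
    · simp [hc]
    · simp [hc]

-- ===== VERDICT (by name: the statement is the Claim_ definition above) =====
theorem find_auto_trigger_spec : Claim_equal_find_auto_trigger := by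
  intro ins exp starts fins _
  unfold Spec_find_auto_trigger find_auto_trigger find_auto_trigger_alt
  rw [fatOuter_eq]
  simp only []
  rw [fatAlt_foldl_inv (fins.zip (starts.drop 1)) (ins.zip exp) (fun _ => []),
    List.foldl_map]
  simp
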